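-- pv_equiv track=rewrite | github.com/Bennyhwanggggg/Algorithm-and-Data-Structures-and-Coding-Challenges | Challenges/cokeMachine.py | coke_machine
-- ===== SOURCE A (Python) =====
-- def coke_machine(buttons, target):
--     level = set(tuple(button) for button in buttons)
--     memo = level
--     while level:
--         next_level = set()
--         for potential_sol in level:
--             memo.add(potential_sol)
--             if potential_sol[0] >= target[0] and potential_sol[1] <= target[1]:
--                 return True
--             for button in buttons:
--                 potential_next_sol = (potential_sol[0] + button[0],
--                                       potential_sol[1] + button[1])
--                 if potential_next_sol[1] <= target[1] and potential_next_sol not in memo: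
--                     next_level.add(potential_next_sol)
--         level = next_level
--     return False
-- ===== SOURCE B (Python) =====
-- def coke_machine(buttons, target):
--     if not buttons:
--         return False
--     t0, t1 = target[0], target[1]
--     # one press of a single button already meets the target
--     if any(b[0] >= t0 and b[1] <= t1 for b in buttons):
--         return True
--     # a free button (second entry 0) with positive first entry can be pressed arbitrarily often
--     if t1 >= 0 and any(b[1] == 0 and b[0] > 0 for b in buttons):
--         return True
--     # unbounded-knapsack DP over second-sums 1..t1 on the buttons with positive second entry:
--     # best[j] = max first-sum over nonempty multisets with second-sum exactly j (None = unreachable)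
--     pos = [b for b in buttons if b[1] > 0]
--     n = t1 if t1 >= 0 else 0
--     best = [0]
--     for j in range(1, n + 1):
--         m = None
--         for b in pos:
--             if b[1] <= j and best[j - b[1]] is not None:
--                 c = b[0] + best[j - b[1]]
--                 if m is None or c > m:
--                     m = c
--         if m is not None and m >= t0:
--             return True
--         best.append(m)
--     return False
-- ===== Notes on version B (the rewrite author's own statement) =====
-- stated objective: alternative
-- what changed: A's breadth-first search over the set of reachable (first,second) pair states (with a memo set) is replaced by a single-button early exit, a free-button (second entry 0, positive first) check, and a bottom-up unbounded-knapsack DP over second-sums 0..target[1] that keeps only the maximal achievable first-sum per second-sum.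
-- outside the precondition, e.g. on coke_machine([[1, -1], [5, 3]], [10, 4]): A returns True, B returns False; on coke_machine([[-1, 0]], [-1, 7]): A returns True, B returns True
import Mathlib
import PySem

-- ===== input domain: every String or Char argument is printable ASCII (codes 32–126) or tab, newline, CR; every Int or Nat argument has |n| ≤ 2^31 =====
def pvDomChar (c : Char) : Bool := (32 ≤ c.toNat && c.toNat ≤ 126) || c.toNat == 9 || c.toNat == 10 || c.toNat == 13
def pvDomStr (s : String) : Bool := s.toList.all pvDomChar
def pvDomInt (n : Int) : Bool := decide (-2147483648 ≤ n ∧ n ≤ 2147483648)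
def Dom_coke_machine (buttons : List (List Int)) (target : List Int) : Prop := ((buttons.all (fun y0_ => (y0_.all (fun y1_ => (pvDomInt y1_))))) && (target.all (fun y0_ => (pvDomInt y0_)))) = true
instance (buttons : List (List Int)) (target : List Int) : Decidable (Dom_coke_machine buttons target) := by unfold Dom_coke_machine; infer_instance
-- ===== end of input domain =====

-- B replaces A's breadth-first search over (first,second) pair states by a single-press check,
-- a free-button (second entry 0) check, and an unbounded-knapsack DP over second-sums 0..target[1].

-- ===== PORT A =====
-- tuples are modelled as List Int; indexing s[0]/s[1] is via getD, exact for lists of length ≥ 2 (Pre_).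
def pvStepA (s b : List Int) : List Int :=
  [s.getD 0 0 + b.getD 0 0, s.getD 1 0 + b.getD 1 0]

-- the inner 'for button in buttons' loop building next_level
def pvExpandA (buttons : List (List Int)) (t1 : Int) (memo : PySem.Set (List Int))
    (s : List Int) (nx : PySem.Set (List Int)) : PySem.Set (List Int) :=
  buttons.foldl (fun nx b =>
    if (pvStepA s b).getD 1 0 ≤ t1 && !(PySem.Set.contains memo (pvStepA s b)) then
      PySem.Set.add nx (pvStepA s b)
    else nx) nx

-- the 'for potential_sol in level' loop; 'none' models the early 'return True'
def pvInnerA (buttons : List (List Int)) (target : List Int) :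
    List (List Int) → PySem.Set (List Int) → PySem.Set (List Int) →
    Option (PySem.Set (List Int) × PySem.Set (List Int))
  | [], memo, nx => some (memo, nx)
  | s :: rest, memo, nx =>
    let memo' := PySem.Set.add memo s
    if target.getD 0 0 ≤ s.getD 0 0 && s.getD 1 0 ≤ target.getD 1 0 then none
    else pvInnerA buttons target rest memo' (pvExpandA buttons (target.getD 1 0) memo' s nx)

-- the 'while level:' loop; fuel is only a totality guard (sufficient under Pre_, see coke_machine_iff)
def pvLoopA (buttons : List (List Int)) (target : List Int) :
    Nat → PySem.Set (List Int) → PySem.Set (List Int) → Bool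
  | 0, _, _ => false
  | fuel+1, level, memo =>
    if level.isEmpty then false
    else
      match pvInnerA buttons target level memo PySem.Set.empty with
      | none => true
      | some (memo', nx) => pvLoopA buttons target fuel nx memo'

def coke_machine (buttons : List (List Int)) (target : List Int) : Bool :=
  let level := PySem.Set.ofList buttons
  pvLoopA buttons target ((target.getD 0 0).toNat + (target.getD 1 0).toNat + 4) level level

-- ===== PORT B =====
-- best[j] = max first-sum over nonempty multisets of pos-buttons with second-sum exactly j (none = unreachable)
def pvBestStepB (buttons : List (List Int)) (best : List (Option Int)) (j : Int) : Option Int :=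
  buttons.foldl (fun m b =>
    if b.getD 1 0 ≤ j then
      match best.getD (j - b.getD 1 0).toNat none with
      | none => m
      | some v =>
        match m with
        | none => some (b.getD 0 0 + v)
        | some mv => if mv < b.getD 0 0 + v then some (b.getD 0 0 + v) else some mv
    else m) none

-- 'for j in range(1, n+1)' with early 'return True'; best.length plays the role of j
def pvLoopB (buttons : List (List Int)) (t0 : Int) : Nat → List (Option Int) → Bool
  | 0, _ => false
  | k+1, best =>
    let m := pvBestStepB buttons best (best.length : Int)
    match m with
    | some v => if t0 ≤ v then true else pvLoopB buttons t0 k (best ++ [m])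
    | none => pvLoopB buttons t0 k (best ++ [m])

def coke_machine_alt (buttons : List (List Int)) (target : List Int) : Bool :=
  if buttons.isEmpty then false
  else
    if buttons.any (fun b => decide (b.getD 0 0 ≥ target.getD 0 0) && decide (b.getD 1 0 ≤ target.getD 1 0)) then true
    else if decide (0 ≤ target.getD 1 0) && buttons.any (fun b => (b.getD 1 0 == 0) && decide (0 < b.getD 0 0)) then true
    else
      pvLoopB (buttons.filter (fun b => decide (0 < b.getD 1 0))) (target.getD 0 0)
        (if 0 ≤ target.getD 1 0 then (target.getD 1 0).toNat else 0) [some 0]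

-- ===== PRECONDITION & SPEC =====
-- Pre_ excludes: (i) buttons/targets with fewer than two entries, where Python A raises IndexError
-- (a short target is fine when buttons is empty: neither program indexes it);
-- (ii) buttons with a negative second entry, on which A's breadth-first search may run forever
-- (the reachable state space becomes infinite) and its answer depends on the order of presses
-- rather than on the chosen multiset of buttons (see cites);
-- (iii) buttons with second entry 0 and negative first entry, on which A diverges whenever the
-- target is unreachable (wherever A does return there, B returns the same value, see cites).
def Pre_coke_machine (buttons : List (List Int)) (target : List Int) : Prop :=
  (buttons = [] ∨ 2 ≤ target.length) ∧
    ∀ b ∈ buttons, 2 ≤ b.length ∧ 0 ≤ b.getD 1 0 ∧ (b.getD 1 0 = 0 → 0 ≤ b.getD 0 0)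

instance (buttons : List (List Int)) (target : List Int) : Decidable (Pre_coke_machine buttons target) := by
  unfold Pre_coke_machine; infer_instance

def pvWitness_coke_machine : List (List Int) × List Int := ([[1, 1], [3, 2], [2, 0]], [4, 3])

def Spec_coke_machine (buttons : List (List Int)) (target : List Int) (out : Bool) : Prop := out = coke_machine_alt buttons target
instance (buttons : List (List Int)) (target : List Int) (out : Bool) : Decidable (Spec_coke_machine buttons target out) := by unfold Spec_coke_machine; infer_instance

-- ===== CLAIM (what is proved, stated in full; the proofs are below) =====
def Claim_equal_coke_machine : Prop := ∀ (buttons : List (List Int)) (target : List Int), Dom_coke_machine buttons target → Pre_coke_machine buttons target → Spec_coke_machine buttons target (coke_machine buttons target)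

-- ===== LEMMAS AND PROOFS =====

-- first/second component sums of a list of buttons
def pvSum1 (l : List (List Int)) : Int := (l.map (fun b => b.getD 0 0)).sum
def pvSum2 (l : List (List Int)) : Int := (l.map (fun b => b.getD 1 0)).sum

-- the common specification: some nonempty multiset of buttons has second-sum ≤ t1 and first-sum ≥ t0
def pvAnswer (buttons : List (List Int)) (t0 t1 : Int) : Prop :=
  ∃ l : List (List Int), l ≠ [] ∧ (∀ b ∈ l, b ∈ buttons) ∧ pvSum2 l ≤ t1 ∧ t0 ≤ pvSum1 l

def pvReach (buttons : List (List Int)) (j f : Int) : Prop :=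
  ∃ l : List (List Int), (∀ b ∈ l, b ∈ buttons) ∧ pvSum2 l = j ∧ pvSum1 l = f

def pvMaxOf (o : Option Int) (P : Int → Prop) : Prop :=
  match o with
  | none => ∀ x, ¬ P x
  | some v => P v ∧ ∀ x, P x → x ≤ v

def pvPos (buttons : List (List Int)) : Prop := ∀ b ∈ buttons, 1 ≤ b.getD 1 0

def pvNext (buttons : List (List Int)) (t1 : Int) (s t : List Int) : Prop :=
  ∃ b ∈ buttons, t = pvStepA s b ∧ t.getD 1 0 ≤ t1

def pvG (t0 t1 : Int) (s : List Int) : Prop := t0 ≤ s.getD 0 0 ∧ s.getD 1 0 ≤ t1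

-- reachability from a source set within n steps
inductive pvRN (buttons : List (List Int)) (t1 : Int) (S : List Int → Prop) : Nat → List Int → Prop
  | base (n : Nat) (s : List Int) : S s → pvRN buttons t1 S n s
  | step (n : Nat) (s t : List Int) : pvRN buttons t1 S n s → pvNext buttons t1 s t →
      pvRN buttons t1 S (n+1) t

theorem pvSum2_cons (b : List Int) (l : List (List Int)) :
    pvSum2 (b :: l) = b.getD 1 0 + pvSum2 l := by simp [pvSum2]

theorem pvSum1_cons (b : List Int) (l : List (List Int)) :
    pvSum1 (b :: l) = b.getD 0 0 + pvSum1 l := by simp [pvSum1]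

theorem pvSum2_append_singleton (l : List (List Int)) (b : List Int) :
    pvSum2 (l ++ [b]) = pvSum2 l + b.getD 1 0 := by simp [pvSum2]

theorem pvSum1_append_singleton (l : List (List Int)) (b : List Int) :
    pvSum1 (l ++ [b]) = pvSum1 l + b.getD 0 0 := by simp [pvSum1]

theorem pvSum2_ge_len (l : List (List Int)) (h : ∀ b ∈ l, 1 ≤ b.getD 1 0) :
    (l.length : Int) ≤ pvSum2 l := by
  induction l with
  | nil => simp [pvSum2]
  | cons b l ih =>
    have hb := h b (by simp)
    have hl := ih (fun x hx => h x (by simp [hx]))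
    rw [pvSum2_cons]
    simp only [List.length_cons]
    push_cast
    omega

theorem pvSum2_nonneg (l : List (List Int)) (h : ∀ b ∈ l, 0 ≤ b.getD 1 0) :
    0 ≤ pvSum2 l := by
  induction l with
  | nil => simp [pvSum2]
  | cons b l ih =>
    have hb := h b (by simp)
    have hl := ih (fun x hx => h x (by simp [hx]))
    rw [pvSum2_cons]
    omega

theorem pvSum1_replicate (k : Nat) (b : List Int) :
    pvSum1 (List.replicate k b) = (k : Int) * b.getD 0 0 := by
  induction k with
  | zero => simp [pvSum1]
  | succ k ih =>
    rw [List.replicate_succ, pvSum1_cons, ih]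
    push_cast
    ring

theorem pvSum2_replicate (k : Nat) (b : List Int) :
    pvSum2 (List.replicate k b) = (k : Int) * b.getD 1 0 := by
  induction k with
  | zero => simp [pvSum2]
  | succ k ih =>
    rw [List.replicate_succ, pvSum2_cons, ih]
    push_cast
    ring

theorem pvSum_filter (l : List (List Int))
    (h : ∀ b ∈ l, ¬(0 < b.getD 1 0) → b.getD 0 0 = 0 ∧ b.getD 1 0 = 0) :
    pvSum1 (l.filter (fun b => decide (0 < b.getD 1 0))) = pvSum1 l ∧
      pvSum2 (l.filter (fun b => decide (0 < b.getD 1 0))) = pvSum2 l := by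
  induction l with
  | nil => simp
  | cons b l ih =>
    obtain ⟨ih1, ih2⟩ := ih (fun x hx hnx => h x (by simp [hx]) hnx)
    by_cases hb : 0 < b.getD 1 0
    · rw [List.filter_cons_of_pos (by simpa using hb)]
      rw [pvSum1_cons, pvSum2_cons, pvSum1_cons, pvSum2_cons, ih1, ih2]
      exact ⟨rfl, rfl⟩
    · obtain ⟨h0, h1⟩ := h b (by simp) hb
      rw [List.filter_cons_of_neg (by simpa using hb)]
      rw [pvSum1_cons, pvSum2_cons, h0, h1, ih1, ih2]
      omega

theorem pvReach_zero {buttons : List (List Int)} (hpos : pvPos buttons) (f : Int) :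
    pvReach buttons 0 f ↔ f = 0 := by
  constructor
  · rintro ⟨l, hl, h2, h1⟩
    have hlen := pvSum2_ge_len l (fun b hb => hpos b (hl b hb))
    have : l = [] := by
      cases l with
      | nil => rfl
      | cons b l => exfalso; simp at hlen; omega
    subst this
    simpa [pvSum1] using h1.symm
  · rintro rfl
    exact ⟨[], by simp, by simp [pvSum2], by simp [pvSum1]⟩

theorem pvReach_nonneg {buttons : List (List Int)} (hpos : pvPos buttons) {j f : Int}
    (h : pvReach buttons j f) : 0 ≤ j := by
  obtain ⟨l, hl, h2, _⟩ := h
  have := pvSum2_ge_len l (fun b hb => hpos b (hl b hb))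
  omega

theorem pvReach_decompose {buttons : List (List Int)} {j f : Int}
    (hj : 1 ≤ j) :
    pvReach buttons j f ↔ ∃ b ∈ buttons, pvReach buttons (j - b.getD 1 0) (f - b.getD 0 0) := by
  constructor
  · rintro ⟨l, hl, h2, h1⟩
    cases l with
    | nil => exfalso; simp [pvSum2] at h2; omega
    | cons b rest =>
      refine ⟨b, hl b (by simp), rest, fun x hx => hl x (by simp [hx]), ?_, ?_⟩
      · rw [pvSum2_cons] at h2; omega
      · rw [pvSum1_cons] at h1; omega
  · rintro ⟨b, hb, l, hl, h2, h1⟩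
    refine ⟨b :: l, ?_, ?_, ?_⟩
    · intro x hx
      rcases List.mem_cons.mp hx with rfl | hx
      · exact hb
      · exact hl x hx
    · rw [pvSum2_cons]; omega
    · rw [pvSum1_cons]; omega

-- ---------- A-side lemmas ----------

theorem pvStepA_getD0 (s b : List Int) : (pvStepA s b).getD 0 0 = s.getD 0 0 + b.getD 0 0 := rfl

theorem pvStepA_getD1 (s b : List Int) : (pvStepA s b).getD 1 0 = s.getD 1 0 + b.getD 1 0 := rfl

theorem pv_mem_expand (buttons : List (List Int)) (t1 : Int) (memo : PySem.Set (List Int))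
    (s : List Int) (nx : PySem.Set (List Int)) (x : List Int) :
    x ∈ pvExpandA buttons t1 memo s nx ↔
      x ∈ nx ∨ ∃ b ∈ buttons, x = pvStepA s b ∧ (pvStepA s b).getD 1 0 ≤ t1 ∧ pvStepA s b ∉ memo := by
  induction buttons generalizing nx with
  | nil => simp [pvExpandA]
  | cons b bs ih =>
    have hstep : x ∈ (if ((pvStepA s b).getD 1 0 ≤ t1 && !(PySem.Set.contains memo (pvStepA s b))) = true
          then PySem.Set.add nx (pvStepA s b) else nx) ↔
        x ∈ nx ∨ (x = pvStepA s b ∧ (pvStepA s b).getD 1 0 ≤ t1 ∧ pvStepA s b ∉ memo) := by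
      split_ifs with hcond
      · have h1 : (pvStepA s b).getD 1 0 ≤ t1 := by
          by_contra h1
          rw [decide_eq_false h1, Bool.false_and] at hcond
          cases hcond
        have h2 : pvStepA s b ∉ memo := by
          intro hmem
          rw [show PySem.Set.contains memo (pvStepA s b) = true by simp [hmem],
            Bool.not_true, Bool.and_false] at hcond
          cases hcond
        rw [PySem.Set.mem_add]
        constructor
        · rintro (hx | hx)
          · exact Or.inl hx
          · exact Or.inr ⟨hx, h1, h2⟩
        · rintro (hx | ⟨hx, _, _⟩)
          · exact Or.inl hx
          · exact Or.inr hx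
      · constructor
        · exact Or.inl
        · rintro (hx | ⟨_, hc1, hc2⟩)
          · exact hx
          · refine absurd ?_ hcond
            rw [decide_eq_true hc1, show PySem.Set.contains memo (pvStepA s b) = false by simp [hc2]]
            rfl
    have hunfold : pvExpandA (b :: bs) t1 memo s nx =
        pvExpandA bs t1 memo s (if ((pvStepA s b).getD 1 0 ≤ t1 && !(PySem.Set.contains memo (pvStepA s b))) = true
          then PySem.Set.add nx (pvStepA s b) else nx) := rfl
    rw [hunfold, ih, hstep]
    constructor
    · rintro ((hx | hx) | ⟨b', hb', h⟩)
      · exact Or.inl hx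
      · exact Or.inr ⟨b, by simp, hx⟩
      · exact Or.inr ⟨b', by simp [hb'], h⟩
    · rintro (hx | ⟨b', hb', h⟩)
      · exact Or.inl (Or.inl hx)
      · rcases List.mem_cons.mp hb' with rfl | hb'
        · exact Or.inl (Or.inr h)
        · exact Or.inr ⟨b', hb', h⟩

theorem pvInnerA_none (buttons : List (List Int)) (target : List Int) :
    ∀ (L : List (List Int)) (memo nx : PySem.Set (List Int)),
    pvInnerA buttons target L memo nx = none →
    ∃ s ∈ L, target.getD 0 0 ≤ s.getD 0 0 ∧ s.getD 1 0 ≤ target.getD 1 0 := by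
  intro L
  induction L with
  | nil => intro memo nx h; simp [pvInnerA] at h
  | cons s rest ih =>
    intro memo nx h
    simp only [pvInnerA] at h
    by_cases hc : target.getD 0 0 ≤ s.getD 0 0 ∧ s.getD 1 0 ≤ target.getD 1 0
    · exact ⟨s, by simp, hc⟩
    · have hb : (decide (target.getD 0 0 ≤ s.getD 0 0) && decide (s.getD 1 0 ≤ target.getD 1 0)) = false := by
        rcases not_and_or.mp hc with h' | h'
        · rw [decide_eq_false h', Bool.false_and]
        · rw [decide_eq_false h', Bool.and_false]
      rw [hb] at h
      simp only [Bool.false_eq_true, if_false] at h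
      obtain ⟨s', hs', hg⟩ := ih _ _ h
      exact ⟨s', by simp [hs'], hg⟩

theorem pvInnerA_some (buttons : List (List Int)) (target : List Int) :
    ∀ (L : List (List Int)) (memo nx m1 nx1 : PySem.Set (List Int)),
    pvInnerA buttons target L memo nx = some (m1, nx1) →
    (∀ x, x ∈ m1 ↔ x ∈ memo ∨ x ∈ L) ∧
    (∀ x, x ∈ nx → x ∈ nx1) ∧
    (∀ s ∈ L, ¬ (target.getD 0 0 ≤ s.getD 0 0 ∧ s.getD 1 0 ≤ target.getD 1 0) ∧
       ∀ t, pvNext buttons (target.getD 1 0) s t → t ∈ m1 ∨ t ∈ nx1) ∧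
    (∀ x, x ∈ nx1 → x ∈ nx ∨ ∃ s ∈ L, pvNext buttons (target.getD 1 0) s x) := by
  intro L
  induction L with
  | nil =>
    intro memo nx m1 nx1 h
    simp only [pvInnerA, Option.some.injEq, Prod.mk.injEq] at h
    obtain ⟨rfl, rfl⟩ := h
    exact ⟨fun x => by simp, fun x hx => hx, by simp, fun x hx => Or.inl hx⟩
  | cons s rest ih =>
    intro memo nx m1 nx1 h
    simp only [pvInnerA] at h
    by_cases hc : target.getD 0 0 ≤ s.getD 0 0 ∧ s.getD 1 0 ≤ target.getD 1 0
    · rw [if_pos (show (decide (target.getD 0 0 ≤ s.getD 0 0) && decide (s.getD 1 0 ≤ target.getD 1 0)) = true by rw [decide_eq_true hc.1, decide_eq_true hc.2]; rfl)] at h; cases h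
    · have hb : (decide (target.getD 0 0 ≤ s.getD 0 0) && decide (s.getD 1 0 ≤ target.getD 1 0)) = false := by
        rcases not_and_or.mp hc with h' | h'
        · rw [decide_eq_false h', Bool.false_and]
        · rw [decide_eq_false h', Bool.and_false]
      rw [hb] at h
      simp only [Bool.false_eq_true, if_false] at h
      obtain ⟨hm, hnxmono, hproc, hnew⟩ := ih _ _ _ _ h
      refine ⟨?_, ?_, ?_, ?_⟩
      · intro x
        rw [hm x, PySem.Set.mem_add]
        constructor
        · rintro ((hx | rfl) | hx)
          · exact Or.inl hx
          · exact Or.inr (by simp)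
          · exact Or.inr (by simp [hx])
        · rintro (hx | hx)
          · exact Or.inl (Or.inl hx)
          · rcases List.mem_cons.mp hx with rfl | hx
            · exact Or.inl (Or.inr rfl)
            · exact Or.inr hx
      · intro x hx
        apply hnxmono
        rw [pv_mem_expand]
        exact Or.inl hx
      · intro s' hs'
        rcases List.mem_cons.mp hs' with rfl | hs'
        · refine ⟨hc, ?_⟩
          intro t ht
          obtain ⟨b, hb', rfl, hle⟩ := ht
          by_cases hmem : pvStepA s' b ∈ PySem.Set.add memo s'
          · left; rw [hm]; left; exact hmem
          · right
            apply hnxmono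
            rw [pv_mem_expand]
            exact Or.inr ⟨b, hb', rfl, hle, hmem⟩
        · exact hproc s' hs'
      · intro x hx
        rcases hnew x hx with hx' | hx'
        · rw [pv_mem_expand] at hx'
          rcases hx' with hx' | ⟨b, hb', rfl, hle, _⟩
          · exact Or.inl hx'
          · exact Or.inr ⟨s, by simp, b, hb', rfl, hle⟩
        · obtain ⟨s', hs', hn⟩ := hx'
          exact Or.inr ⟨s', by simp [hs'], hn⟩

theorem pvRN_mono_S {buttons : List (List Int)} {t1 : Int} {S S' : List Int → Prop}
    (hSS : ∀ x, S x → S' x) {n : Nat} {s : List Int}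
    (h : pvRN buttons t1 S n s) : pvRN buttons t1 S' n s := by
  induction h with
  | base n s hs => exact pvRN.base n s (hSS s hs)
  | step n s t _ hn ih => exact pvRN.step n s t ih hn

theorem pvRN_closed {buttons : List (List Int)} {t1 : Int} {S : List Int → Prop}
    (hcl : ∀ s, S s → ∀ t, pvNext buttons t1 s t → S t) {n : Nat} {s : List Int}
    (h : pvRN buttons t1 S n s) : S s := by
  induction h with
  | base n s hs => exact hs
  | step n s t hs hn ih => exact hcl s ih t hn

theorem pvReroute (buttons : List (List Int)) (t1 : Int) (m1 nx1 : PySem.Set (List Int))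
    (H : ∀ s, s ∈ m1 → ∀ t, pvNext buttons t1 s t → t ∈ m1 ∨ t ∈ nx1) :
    ∀ (n : Nat) (g : List Int), pvRN buttons t1 (fun x => x ∈ m1) n g →
      g ∈ m1 ∨ ∃ n', n' < n ∧ pvRN buttons t1 (fun x => x ∈ nx1) n' g := by
  intro n g h
  induction h with
  | base n s hs => exact Or.inl hs
  | step n s t hr hnx ih =>
    rcases ih with hs | ⟨n', hn', hr'⟩
    · rcases H s hs t hnx with ht | ht
      · exact Or.inl ht
      · exact Or.inr ⟨0, by omega, pvRN.base 0 t ht⟩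
    · exact Or.inr ⟨n' + 1, by omega, pvRN.step n' s t hr' hnx⟩

theorem pvLoopA_succ (buttons : List (List Int)) (target : List Int) (fuel : Nat)
    (level memo : PySem.Set (List Int)) :
    pvLoopA buttons target (fuel+1) level memo =
      (if level.isEmpty then false
       else
        match pvInnerA buttons target level memo PySem.Set.empty with
        | none => true
        | some (memo', nx) => pvLoopA buttons target fuel nx memo') := rfl

-- BFS completeness: if a goal state is reachable from memo ∪ level within fuel - 2 steps,
-- the loop returns true
theorem pvComplete (buttons : List (List Int)) (target : List Int) :
    ∀ (fuel : Nat) (level memo : PySem.Set (List Int)),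
    (∀ s ∈ memo, s ∈ level ∨ (¬ pvG (target.getD 0 0) (target.getD 1 0) s ∧
        ∀ t, pvNext buttons (target.getD 1 0) s t → t ∈ memo ∨ t ∈ level)) →
    ∀ (n : Nat) (g : List Int), n + 2 ≤ fuel →
    pvRN buttons (target.getD 1 0) (fun x => x ∈ memo ∨ x ∈ level) n g →
    pvG (target.getD 0 0) (target.getD 1 0) g →
    pvLoopA buttons target fuel level memo = true := by
  intro fuel
  induction fuel with
  | zero => intro level memo _ n g hn _ _; omega
  | succ f ih =>
    intro level memo hinv n g hn hrn hg
    by_cases hemp : level.isEmpty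
    · exfalso
      have hempty : ∀ x : List Int, x ∉ level := by
        rw [List.isEmpty_iff] at hemp
        intro x hx
        rw [hemp] at hx
        exact absurd hx (by simp)
      have hcl : ∀ s, (s ∈ memo ∨ s ∈ level) → ∀ t,
          pvNext buttons (target.getD 1 0) s t → (t ∈ memo ∨ t ∈ level) := by
        rintro s (hs | hs) t ht
        · rcases hinv s hs with hs' | hs'
          · exact absurd hs' (hempty s)
          · exact hs'.2 t ht
        · exact absurd hs (hempty s)
      have hgmem := pvRN_closed hcl hrn
      rcases hgmem with hgm | hgm
      · rcases hinv g hgm with hgl | hgl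
        · exact hempty g hgl
        · exact hgl.1 hg
      · exact hempty g hgm
    · rw [pvLoopA_succ, if_neg hemp]
      cases hinner : pvInnerA buttons target level memo PySem.Set.empty with
      | none => rfl
      | some p =>
        obtain ⟨m1, nx1⟩ := p
        obtain ⟨hm, _, hproc, _⟩ := pvInnerA_some buttons target level memo PySem.Set.empty m1 nx1 hinner
        have hrn' : pvRN buttons (target.getD 1 0) (fun x => x ∈ m1) n g :=
          pvRN_mono_S (fun x hx => (hm x).mpr hx) hrn
        have H : ∀ s, s ∈ m1 → ∀ t, pvNext buttons (target.getD 1 0) s t → t ∈ m1 ∨ t ∈ nx1 := by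
          intro s hs t ht
          rcases (hm s).mp hs with hs' | hs'
          · rcases hinv s hs' with hs'' | hs''
            · exact (hproc s hs'').2 t ht
            · rcases hs''.2 t ht with h' | h'
              · exact Or.inl ((hm t).mpr (Or.inl h'))
              · exact Or.inl ((hm t).mpr (Or.inr h'))
          · exact (hproc s hs').2 t ht
        rcases pvReroute buttons (target.getD 1 0) m1 nx1 H n g hrn' with hgm | ⟨n', hn', hrn''⟩
        · exfalso
          rcases (hm g).mp hgm with hgm' | hgm'
          · rcases hinv g hgm' with hgl | hgl
            · exact (hproc g hgl).1 ⟨hg.1, hg.2⟩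
            · exact hgl.1 hg
          · exact (hproc g hgm').1 ⟨hg.1, hg.2⟩
        · apply ih nx1 m1 ?_ n' g (by omega)
            (pvRN_mono_S (fun x hx => Or.inr hx) hrn'') hg
          intro s hs
          rcases (hm s).mp hs with hs' | hs'
          · rcases hinv s hs' with hs'' | hs''
            · exact Or.inr ⟨fun hgg => (hproc s hs'').1 ⟨hgg.1, hgg.2⟩, (hproc s hs'').2⟩
            · refine Or.inr ⟨hs''.1, ?_⟩
              intro t ht
              rcases hs''.2 t ht with h' | h'
              · exact Or.inl ((hm t).mpr (Or.inl h'))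
              · exact Or.inl ((hm t).mpr (Or.inr h'))
          · exact Or.inr ⟨fun hgg => (hproc s hs').1 ⟨hgg.1, hgg.2⟩, (hproc s hs').2⟩

-- soundness: every state carried by the BFS represents a nonempty multiset of buttons
def pvRep (buttons : List (List Int)) (s : List Int) : Prop :=
  ∃ l : List (List Int), l ≠ [] ∧ (∀ b ∈ l, b ∈ buttons) ∧
    s.getD 0 0 = pvSum1 l ∧ s.getD 1 0 = pvSum2 l

theorem pvRep_step {buttons : List (List Int)} {s : List Int} (hs : pvRep buttons s)
    {b : List Int} (hb : b ∈ buttons) : pvRep buttons (pvStepA s b) := by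
  obtain ⟨l, hne, hl, h1, h2⟩ := hs
  refine ⟨l ++ [b], by simp, ?_, ?_, ?_⟩
  · intro x hx
    rcases List.mem_append.mp hx with hx | hx
    · exact hl x hx
    · simp at hx; subst hx; exact hb
  · rw [pvStepA_getD0, pvSum1_append_singleton, h1]
  · rw [pvStepA_getD1, pvSum2_append_singleton, h2]

theorem pvLoopA_true (buttons : List (List Int)) (target : List Int) :
    ∀ (fuel : Nat) (level memo : PySem.Set (List Int)),
    (∀ s ∈ level, pvRep buttons s) →
    pvLoopA buttons target fuel level memo = true →
    pvAnswer buttons (target.getD 0 0) (target.getD 1 0) := by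
  intro fuel
  induction fuel with
  | zero => intro level memo _ h; simp [pvLoopA] at h
  | succ fuel ih =>
    intro level memo hrep htrue
    by_cases hle : level.isEmpty
    · rw [pvLoopA, if_pos hle] at htrue; simp at htrue
    · rw [pvLoopA, if_neg (by simp [hle])] at htrue
      cases hinner : pvInnerA buttons target level memo PySem.Set.empty with
      | none =>
        obtain ⟨s, hs, hg1, hg2⟩ := pvInnerA_none buttons target level memo PySem.Set.empty hinner
        obtain ⟨l, hne, hl, h1, h2⟩ := hrep s hs
        exact ⟨l, hne, hl, by omega, by omega⟩
      | some p =>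
        obtain ⟨m1, nx1⟩ := p
        rw [hinner] at htrue
        obtain ⟨_, _, _, hnew⟩ := pvInnerA_some buttons target level memo PySem.Set.empty m1 nx1 hinner
        apply ih nx1 m1 ?_ htrue
        intro x hx
        rcases hnew x hx with hx' | hx'
        · simp [PySem.Set.empty] at hx'
        · obtain ⟨s', hs', b, hb, rfl, _⟩ := hx'
          exact pvRep_step (hrep s' hs') hb

-- a positive-second multiset yields a path of length |l| - 1 to its sum state
theorem pvPathN (buttons : List (List Int)) (t1 : Int) :
    ∀ l : List (List Int), l ≠ [] → (∀ b ∈ l, b ∈ buttons) → (∀ b ∈ l, 0 ≤ b.getD 1 0) →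
    pvSum2 l ≤ t1 →
    ∃ st : List Int, pvRN buttons t1 (fun x => x ∈ PySem.Set.ofList buttons) (l.length - 1) st ∧
      st.getD 0 0 = pvSum1 l ∧ st.getD 1 0 = pvSum2 l := by
  intro l
  induction l using List.reverseRecOn with
  | nil => intro h; exact absurd rfl h
  | append_singleton l0 b ih =>
    intro _ hsub hnn hle
    have hb : b ∈ buttons := hsub b (by simp)
    rcases eq_or_ne l0 [] with rfl | hne
    · refine ⟨b, pvRN.base 0 b ?_, ?_, ?_⟩
      · rw [PySem.Set.mem_ofList]; exact hb
      · simp [pvSum1]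
      · simp [pvSum2]
    · have hbn : 0 ≤ b.getD 1 0 := hnn b (by simp)
      have hle0 : pvSum2 l0 ≤ t1 := by
        rw [pvSum2_append_singleton] at hle; omega
      obtain ⟨st0, hrn0, h1, h2⟩ := ih hne (fun x hx => hsub x (by simp [hx]))
        (fun x hx => hnn x (by simp [hx])) hle0
      have hlen : 1 ≤ l0.length := List.length_pos_iff.mpr hne
      refine ⟨pvStepA st0 b, ?_, ?_, ?_⟩
      · have := pvRN.step (l0.length - 1) st0 (pvStepA st0 b) hrn0
          ⟨b, hb, rfl, by
            rw [pvStepA_getD1, h2]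
            rw [pvSum2_append_singleton] at hle
            omega⟩
        have heq : l0.length - 1 + 1 = (l0 ++ [b]).length - 1 := by
          simp only [List.length_append, List.length_cons, List.length_nil]
          omega
        rwa [heq] at this
      · rw [pvStepA_getD0, h1, pvSum1_append_singleton]
      · rw [pvStepA_getD1, h2, pvSum2_append_singleton]

-- pressing a free button (second entry 0) k+1 times
theorem pvZeroPath (buttons : List (List Int)) (t1 : Int) (b : List Int) (hb : b ∈ buttons)
    (h1 : b.getD 1 0 = 0) (ht1 : 0 ≤ t1) :
    ∀ k : Nat, ∃ st : List Int,
      pvRN buttons t1 (fun x => x ∈ PySem.Set.ofList buttons) k st ∧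
      st.getD 0 0 = ((k : Int) + 1) * b.getD 0 0 ∧ st.getD 1 0 = 0 := by
  intro k
  induction k with
  | zero =>
    refine ⟨b, pvRN.base 0 b (by rw [PySem.Set.mem_ofList]; exact hb), by push_cast; ring, h1⟩
  | succ k ih =>
    obtain ⟨st, hrn, h0, hsec⟩ := ih
    refine ⟨pvStepA st b, pvRN.step k st (pvStepA st b) hrn ⟨b, hb, rfl, ?_⟩, ?_, ?_⟩
    · rw [pvStepA_getD1, hsec, h1]; omega
    · rw [pvStepA_getD0, h0]
      push_cast
      ring
    · rw [pvStepA_getD1, hsec, h1]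
      omega

-- decompose the multiset condition into the three cases B checks
theorem pvDecompose (buttons : List (List Int)) (t0 t1 : Int)
    (hb : ∀ b ∈ buttons, 0 ≤ b.getD 1 0 ∧ (b.getD 1 0 = 0 → 0 ≤ b.getD 0 0))
    (h : pvAnswer buttons t0 t1) :
    (∃ b ∈ buttons, t0 ≤ b.getD 0 0 ∧ b.getD 1 0 ≤ t1) ∨
    (0 ≤ t1 ∧ ∃ b ∈ buttons, b.getD 1 0 = 0 ∧ 0 < b.getD 0 0) ∨
    (∃ l : List (List Int), l ≠ [] ∧
      (∀ b ∈ l, b ∈ buttons.filter (fun b => decide (0 < b.getD 1 0))) ∧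
      pvSum2 l ≤ t1 ∧ t0 ≤ pvSum1 l) := by
  obtain ⟨l, hne, hsub, hle, hge⟩ := h
  have hnn : ∀ b ∈ l, 0 ≤ b.getD 1 0 := fun b hbl => (hb b (hsub b hbl)).1
  have ht1 : 0 ≤ t1 := le_trans (pvSum2_nonneg l hnn) hle
  by_cases hz : ∃ z ∈ l, z.getD 1 0 = 0 ∧ 0 < z.getD 0 0
  · obtain ⟨z, hzl, hz1, hz0⟩ := hz
    exact Or.inr (Or.inl ⟨ht1, z, hsub z hzl, hz1, hz0⟩)
  · have hzz : ∀ b ∈ l, ¬(0 < b.getD 1 0) → b.getD 0 0 = 0 ∧ b.getD 1 0 = 0 := by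
      intro b hbl hnp
      have h1 : b.getD 1 0 = 0 := le_antisymm (by omega) (hnn b hbl)
      have h0 : 0 ≤ b.getD 0 0 := (hb b (hsub b hbl)).2 h1
      have : ¬ (0 < b.getD 0 0) := fun hp => hz ⟨b, hbl, h1, hp⟩
      exact ⟨by omega, h1⟩
    obtain ⟨hs1, hs2⟩ := pvSum_filter l hzz
    by_cases hfe : l.filter (fun b => decide (0 < b.getD 1 0)) = []
    · -- every element of l is a (0,0) button: a single press of one of them meets the target
      rw [hfe] at hs1 hs2
      have hsum1 : pvSum1 l = 0 := by rw [← hs1]; simp [pvSum1]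
      have hsum2 : pvSum2 l = 0 := by rw [← hs2]; simp [pvSum2]
      cases l with
      | nil => exact absurd rfl hne
      | cons z l' =>
        have hzn : ¬ (0 < z.getD 1 0) := by
          intro hp
          have hmem : z ∈ (z :: l').filter (fun b => decide (0 < b.getD 1 0)) :=
            List.mem_filter.mpr ⟨by simp, by simpa using hp⟩
          rw [hfe] at hmem
          exact absurd hmem (by simp)
        obtain ⟨hz0, hz1⟩ := hzz z (by simp) hzn
        exact Or.inl ⟨z, hsub z (by simp), by omega, by omega⟩
    · exact Or.inr (Or.inr ⟨l.filter (fun b => decide (0 < b.getD 1 0)), hfe,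
        fun b hbf => List.mem_filter.mpr ⟨hsub b (List.mem_of_mem_filter hbf),
          (List.mem_filter.mp hbf).2⟩, by omega, by omega⟩)

-- ---------- the A-side characterisation ----------

theorem coke_machine_def (buttons : List (List Int)) (target : List Int) :
    coke_machine buttons target =
      pvLoopA buttons target ((target.getD 0 0).toNat + (target.getD 1 0).toNat + 4)
        (PySem.Set.ofList buttons) (PySem.Set.ofList buttons) := rfl

theorem coke_machine_iff (buttons : List (List Int)) (target : List Int)
    (hb : ∀ b ∈ buttons, 0 ≤ b.getD 1 0 ∧ (b.getD 1 0 = 0 → 0 ≤ b.getD 0 0)) :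
    coke_machine buttons target = true ↔
      pvAnswer buttons (target.getD 0 0) (target.getD 1 0) := by
  constructor
  · intro h
    rw [coke_machine_def] at h
    apply pvLoopA_true buttons target _ _ _ ?_ h
    intro s hs
    rw [PySem.Set.mem_ofList] at hs
    exact ⟨[s], by simp, by simpa, by simp [pvSum1], by simp [pvSum2]⟩
  · intro hans
    rw [coke_machine_def]
    have hinv : ∀ s ∈ PySem.Set.ofList buttons, s ∈ PySem.Set.ofList buttons ∨
        (¬ pvG (target.getD 0 0) (target.getD 1 0) s ∧
          ∀ t, pvNext buttons (target.getD 1 0) s t →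
            t ∈ PySem.Set.ofList buttons ∨ t ∈ PySem.Set.ofList buttons) :=
      fun s hs => Or.inl hs
    rcases pvDecompose buttons (target.getD 0 0) (target.getD 1 0) hb hans with
      ⟨b, hbm, hg1, hg2⟩ | ⟨ht1, b, hbm, hb1, hb0⟩ | ⟨l, hlne, hlsub, hls2, hls1⟩
    · exact pvComplete buttons target _ _ _ hinv 0 b (by omega)
        (pvRN.base 0 b (Or.inr (by rw [PySem.Set.mem_ofList]; exact hbm))) ⟨hg1, hg2⟩
    · obtain ⟨st, hrn, h0, h1⟩ :=
        pvZeroPath buttons (target.getD 1 0) b hbm hb1 ht1 (target.getD 0 0).toNat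
      refine pvComplete buttons target _ _ _ hinv (target.getD 0 0).toNat st (by omega)
        (pvRN_mono_S (fun x hx => Or.inr hx) hrn) ⟨?_, by rw [h1]; exact ht1⟩
      rw [h0]
      have hsf : (target.getD 0 0) ≤ ((target.getD 0 0).toNat : Int) := Int.self_le_toNat _
      nlinarith
    · have hsubB : ∀ b ∈ l, b ∈ buttons := fun b hbl =>
        List.mem_of_mem_filter (hlsub b hbl)
      have hpos1 : ∀ b ∈ l, (1:Int) ≤ b.getD 1 0 := by
        intro b hbl
        have := of_decide_eq_true (List.mem_filter.mp (hlsub b hbl)).2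
        omega
      obtain ⟨st, hrn, h0, h1⟩ := pvPathN buttons (target.getD 1 0) l hlne hsubB
        (fun b hbl => by have := hpos1 b hbl; omega) hls2
      have hlen : (l.length : Int) ≤ target.getD 1 0 :=
        le_trans (pvSum2_ge_len l hpos1) hls2
      exact pvComplete buttons target _ _ _ hinv (l.length - 1) st (by omega)
        (pvRN_mono_S (fun x hx => Or.inr hx) hrn)
        ⟨by rw [h0]; exact hls1, by rw [h1]; exact hls2⟩

-- ---------- B-side lemmas ----------

theorem pvMaxOf_transfer {o : Option Int} {C P : Int → Prop}
    (h : pvMaxOf o C) (hCP : ∀ x, C x → P x)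
    (hPC : ∀ x, P x → ∃ c, C c ∧ x ≤ c) : pvMaxOf o P := by
  cases o with
  | none =>
    intro x hx
    obtain ⟨c, hc, _⟩ := hPC x hx
    exact h c hc
  | some v =>
    obtain ⟨hv, hmax⟩ := h
    refine ⟨hCP v hv, ?_⟩
    intro x hx
    obtain ⟨c, hc, hxc⟩ := hPC x hx
    exact le_trans hxc (hmax c hc)

-- candidate value contributed by button b at second-sum j
def pvCand (best : List (Option Int)) (j : Int) (b : List Int) (x : Int) : Prop :=
  b.getD 1 0 ≤ j ∧ ∃ v, best.getD (j - b.getD 1 0).toNat none = some v ∧ x = b.getD 0 0 + v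

-- the body of B's inner fold, named so that the fold lemma can talk about it
def pvFoldB (best : List (Option Int)) (j : Int) (m : Option Int) (b : List Int) : Option Int :=
  if b.getD 1 0 ≤ j then
    match best.getD (j - b.getD 1 0).toNat none with
    | none => m
    | some v =>
      match m with
      | none => some (b.getD 0 0 + v)
      | some mv => if mv < b.getD 0 0 + v then some (b.getD 0 0 + v) else some mv
  else m

theorem pvBestStepB_eq (buttons : List (List Int)) (best : List (Option Int)) (j : Int) :
    pvBestStepB buttons best j = buttons.foldl (pvFoldB best j) none := rfl

theorem pvFoldB_maxOf (best : List (Option Int)) (j : Int) (b : List Int)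
    (acc : Option Int) (P : Int → Prop) (hP : pvMaxOf acc P) :
    pvMaxOf (pvFoldB best j acc b) (fun x => P x ∨ pvCand best j b x) := by
  unfold pvFoldB
  by_cases hbj : b.getD 1 0 ≤ j
  · rw [if_pos hbj]
    cases hlook : best.getD (j - b.getD 1 0).toNat none with
    | none =>
      show pvMaxOf acc _
      cases acc with
      | none =>
        rintro x (hx | ⟨_, v, hv, _⟩)
        · exact hP x hx
        · rw [hlook] at hv; cases hv
      | some w =>
        obtain ⟨hw, hmax⟩ := hP
        refine ⟨Or.inl hw, ?_⟩
        rintro x (hx | ⟨_, v, hv, _⟩)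
        · exact hmax x hx
        · rw [hlook] at hv; cases hv
    | some v =>
      cases acc with
      | none =>
        show pvMaxOf (some (b.getD 0 0 + v)) _
        refine ⟨Or.inr ⟨hbj, v, hlook, rfl⟩, ?_⟩
        rintro x (hx | ⟨_, v', hv', rfl⟩)
        · exact absurd hx (hP x)
        · rw [hlook] at hv'; cases hv'; omega
      | some w =>
        show pvMaxOf (if w < b.getD 0 0 + v then some (b.getD 0 0 + v) else some w) _
        obtain ⟨hw, hmax⟩ := hP
        by_cases hlt : w < b.getD 0 0 + v
        · rw [if_pos hlt]
          refine ⟨Or.inr ⟨hbj, v, hlook, rfl⟩, ?_⟩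
          rintro x (hx | ⟨_, v', hv', rfl⟩)
          · have := hmax x hx; omega
          · rw [hlook] at hv'; cases hv'; omega
        · rw [if_neg hlt]
          refine ⟨Or.inl hw, ?_⟩
          rintro x (hx | ⟨_, v', hv', rfl⟩)
          · exact hmax x hx
          · rw [hlook] at hv'; cases hv'; omega
  · rw [if_neg hbj]
    cases acc with
    | none =>
      rintro x (hx | ⟨hbj', _⟩)
      · exact hP x hx
      · exact hbj hbj'
    | some w =>
      obtain ⟨hw, hmax⟩ := hP
      refine ⟨Or.inl hw, ?_⟩
      rintro x (hx | ⟨hbj', _⟩)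
      · exact hmax x hx
      · exact absurd hbj' hbj

theorem pvBestStep_fold (best : List (Option Int)) (j : Int) :
    ∀ (bs : List (List Int)) (acc : Option Int) (P : Int → Prop),
    pvMaxOf acc P →
    pvMaxOf (bs.foldl (pvFoldB best j) acc) (fun x => P x ∨ ∃ b ∈ bs, pvCand best j b x) := by
  intro bs
  induction bs with
  | nil =>
    intro acc P hP
    simp only [List.foldl_nil]
    cases acc with
    | none =>
      rintro x (hx | ⟨b, hb, _⟩)
      · exact hP x hx
      · exact absurd hb (by simp)
    | some v =>
      obtain ⟨hv, hmax⟩ := hP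
      refine ⟨Or.inl hv, ?_⟩
      rintro x (hx | ⟨b, hb, _⟩)
      · exact hmax x hx
      · exact absurd hb (by simp)
  | cons b bs ih =>
    intro acc P hP
    simp only [List.foldl_cons]
    have step := pvFoldB_maxOf best j b acc P hP
    have := ih (pvFoldB best j acc b) _ step
    apply pvMaxOf_transfer this
    · rintro x ((hx | hx) | hx)
      · exact Or.inl hx
      · exact Or.inr ⟨b, by simp, hx⟩
      · obtain ⟨b', hb', hc⟩ := hx
        exact Or.inr ⟨b', by simp [hb'], hc⟩
    · rintro x (hx | ⟨b', hb', hc⟩)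
      · exact ⟨x, Or.inl (Or.inl hx), le_refl x⟩
      · rcases List.mem_cons.mp hb' with rfl | hb'
        · exact ⟨x, Or.inl (Or.inr hc), le_refl x⟩
        · exact ⟨x, Or.inr ⟨b', hb', hc⟩, le_refl x⟩

theorem pvBestStep_correct (buttons : List (List Int)) (hpos : pvPos buttons)
    (best : List (Option Int)) (hlen : 1 ≤ best.length)
    (hinv : ∀ i : Nat, i < best.length → pvMaxOf (best.getD i none) (pvReach buttons (i : Int))) :
    pvMaxOf (pvBestStepB buttons best (best.length : Int)) (pvReach buttons (best.length : Int)) := by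
  set p : Int := (best.length : Int) with hp
  have hfold := pvBestStep_fold best p buttons none (fun _ => False) (fun x hx => hx)
  rw [pvBestStepB_eq]
  apply pvMaxOf_transfer hfold
  · rintro x (hx | ⟨b, hb, hbj, v, hv, rfl⟩)
    · exact absurd hx id
    · have hb1 := hpos b hb
      have hidx : ((p - b.getD 1 0).toNat : Int) = p - b.getD 1 0 := by
        apply Int.toNat_of_nonneg; omega
      have hlt : (p - b.getD 1 0).toNat < best.length := by omega
      have hmax := hinv _ hlt
      rw [hv] at hmax
      obtain ⟨hreach, _⟩ := hmax
      rw [hidx] at hreach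
      rw [pvReach_decompose (by omega)]
      exact ⟨b, hb, by simpa using hreach⟩
  · intro x hx
    have hp1 : 1 ≤ p := by omega
    rw [pvReach_decompose hp1] at hx
    obtain ⟨b, hb, hreach⟩ := hx
    have hb1 := hpos b hb
    have hj0 : 0 ≤ p - b.getD 1 0 := pvReach_nonneg hpos hreach
    have hbj : b.getD 1 0 ≤ p := by omega
    have hidx : ((p - b.getD 1 0).toNat : Int) = p - b.getD 1 0 := Int.toNat_of_nonneg hj0
    have hlt : (p - b.getD 1 0).toNat < best.length := by omega
    have hmax := hinv _ hlt
    rw [hidx] at hmax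
    cases hlook : best.getD (p - b.getD 1 0).toNat none with
    | none => rw [hlook] at hmax; exact absurd hreach (hmax _)
    | some v =>
      rw [hlook] at hmax
      obtain ⟨_, hle⟩ := hmax
      refine ⟨b.getD 0 0 + v, Or.inr ⟨b, hb, hbj, v, hlook, rfl⟩, ?_⟩
      have := hle _ hreach
      omega

theorem pvLoopB_succ (buttons : List (List Int)) (t0 : Int) (k : Nat) (best : List (Option Int)) :
    pvLoopB buttons t0 (k+1) best =
      (match pvBestStepB buttons best (best.length : Int) with
        | some v => if t0 ≤ v then true
            else pvLoopB buttons t0 k (best ++ [pvBestStepB buttons best (best.length : Int)])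
        | none => pvLoopB buttons t0 k (best ++ [pvBestStepB buttons best (best.length : Int)])) := rfl

theorem pvLoopB_iff (buttons : List (List Int)) (t0 : Int) (hpos : pvPos buttons) :
    ∀ (k : Nat) (best : List (Option Int)), 1 ≤ best.length →
    (∀ i : Nat, i < best.length → pvMaxOf (best.getD i none) (pvReach buttons (i : Int))) →
    (pvLoopB buttons t0 k best = true ↔
      ∃ j : Nat, best.length ≤ j ∧ j < best.length + k ∧ ∃ f, t0 ≤ f ∧ pvReach buttons (j : Int) f) := by
  intro k
  induction k with
  | zero =>
    intro best _ _
    simp only [pvLoopB]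
    constructor
    · intro h; cases h
    · rintro ⟨j, hj1, hj2, _⟩; omega
  | succ k ih =>
    intro best hlen hinv
    have hbest := pvBestStep_correct buttons hpos best hlen hinv
    have hinv' : ∀ i : Nat, i < (best ++ [pvBestStepB buttons best (best.length : Int)]).length →
        pvMaxOf ((best ++ [pvBestStepB buttons best (best.length : Int)]).getD i none)
          (pvReach buttons (i : Int)) := by
      intro i hi
      simp only [List.length_append, List.length_cons, List.length_nil] at hi
      by_cases hilt : i < best.length
      · rw [List.getD_append _ _ _ _ hilt]
        exact hinv i hilt
      · have hieq : i = best.length := by omega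
        subst hieq
        rw [List.getD_append_right _ _ _ _ (le_refl _)]
        simpa using hbest
    rw [pvLoopB_succ]
    cases hme : pvBestStepB buttons best (best.length : Int) with
    | none =>
      rw [hme] at hbest hinv'
      show pvLoopB buttons t0 k (best ++ [none]) = true ↔ _
      rw [ih (best ++ [none]) (by simp) hinv']
      constructor
      · rintro ⟨j, hj1, hj2, hf⟩
        simp only [List.length_append, List.length_cons, List.length_nil] at hj1 hj2
        exact ⟨j, by omega, by omega, hf⟩
      · rintro ⟨j, hj1, hj2, f, hf, hreach⟩
        have hjne : j ≠ best.length := by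
          rintro rfl
          exact absurd hreach (hbest f)
        refine ⟨j, ?_, ?_, f, hf, hreach⟩ <;>
          simp only [List.length_append, List.length_cons, List.length_nil] <;> omega
    | some v =>
      rw [hme] at hbest hinv'
      obtain ⟨hreachv, hmaxv⟩ := hbest
      show (if t0 ≤ v then true else pvLoopB buttons t0 k (best ++ [some v])) = true ↔ _
      by_cases hv : t0 ≤ v
      · rw [if_pos hv]
        constructor
        · intro _
          exact ⟨best.length, le_refl _, by omega, v, hv, hreachv⟩
        · intro _; rfl
      · rw [if_neg hv]
        rw [ih (best ++ [some v]) (by simp) hinv']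
        constructor
        · rintro ⟨j, hj1, hj2, hf⟩
          simp only [List.length_append, List.length_cons, List.length_nil] at hj1 hj2
          exact ⟨j, by omega, by omega, hf⟩
        · rintro ⟨j, hj1, hj2, f, hf, hreach⟩
          have hjne : j ≠ best.length := by
            rintro rfl
            exact absurd hv (by have := hmaxv f hreach; omega)
          refine ⟨j, ?_, ?_, f, hf, hreach⟩ <;>
            simp only [List.length_append, List.length_cons, List.length_nil] <;> omega

theorem coke_machine_alt_iff (buttons : List (List Int)) (target : List Int)
    (hb : ∀ b ∈ buttons, 0 ≤ b.getD 1 0 ∧ (b.getD 1 0 = 0 → 0 ≤ b.getD 0 0))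
    (hbne : buttons ≠ []) :
    coke_machine_alt buttons target = true ↔
      pvAnswer buttons (target.getD 0 0) (target.getD 1 0) := by
  have hnemp : buttons.isEmpty = false := by simp [hbne]
  unfold coke_machine_alt
  rw [hnemp]
  simp only [Bool.false_eq_true, if_false]
  by_cases hany1 : ∃ b ∈ buttons, target.getD 0 0 ≤ b.getD 0 0 ∧ b.getD 1 0 ≤ target.getD 1 0
  · obtain ⟨b, hbm, hg1, hg2⟩ := hany1
    rw [if_pos (List.any_eq_true.mpr ⟨b, hbm, by
      rw [decide_eq_true (show b.getD 0 0 ≥ target.getD 0 0 from hg1), decide_eq_true hg2]; rfl⟩)]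
    refine ⟨fun _ => ⟨[b], by simp, by simpa, ?_, ?_⟩, fun _ => rfl⟩
    · simp only [pvSum2, List.map_cons, List.map_nil, List.sum_cons, List.sum_nil, add_zero]
      exact hg2
    · simp only [pvSum1, List.map_cons, List.map_nil, List.sum_cons, List.sum_nil, add_zero]
      exact hg1
  · have hany1b : (buttons.any fun b =>
        decide (b.getD 0 0 ≥ target.getD 0 0) && decide (b.getD 1 0 ≤ target.getD 1 0)) = false := by
      rw [Bool.eq_false_iff]
      intro htrue
      obtain ⟨b, hbm, hbt⟩ := List.any_eq_true.mp htrue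
      obtain ⟨h1, h2⟩ := Bool.and_eq_true_iff.mp hbt
      exact hany1 ⟨b, hbm, of_decide_eq_true h1, of_decide_eq_true h2⟩
    rw [hany1b]
    simp only [Bool.false_eq_true, if_false]
    by_cases hany2 : 0 ≤ target.getD 1 0 ∧ ∃ b ∈ buttons, b.getD 1 0 = 0 ∧ 0 < b.getD 0 0
    · obtain ⟨ht1, b, hbm, hb1, hb0⟩ := hany2
      rw [if_pos (by
        rw [decide_eq_true ht1, Bool.true_and]
        exact List.any_eq_true.mpr ⟨b, hbm, by
          rw [show (b.getD 1 0 == 0) = true from beq_iff_eq.mpr hb1, decide_eq_true hb0]; rfl⟩)]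
      refine ⟨fun _ => ?_, fun _ => rfl⟩
      refine ⟨List.replicate ((target.getD 0 0).toNat + 1) b, by simp, ?_, ?_, ?_⟩
      · intro x hx
        rw [List.eq_of_mem_replicate hx]
        exact hbm
      · rw [pvSum2_replicate, hb1]
        simpa using ht1
      · rw [pvSum1_replicate]
        have hsf : (target.getD 0 0) ≤ (((target.getD 0 0).toNat : Int)) := Int.self_le_toNat _
        push_cast
        nlinarith
    · have hany2b : (decide (0 ≤ target.getD 1 0) && buttons.any fun b =>
          (b.getD 1 0 == 0) && decide (0 < b.getD 0 0)) = false := by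
        rw [Bool.eq_false_iff]
        intro htrue
        obtain ⟨h1, h2⟩ := Bool.and_eq_true_iff.mp htrue
        obtain ⟨b, hbm, hbt⟩ := List.any_eq_true.mp h2
        obtain ⟨h3, h4⟩ := Bool.and_eq_true_iff.mp hbt
        exact hany2 ⟨of_decide_eq_true h1, b, hbm, beq_iff_eq.mp h3, of_decide_eq_true h4⟩
      rw [hany2b]
      simp only [Bool.false_eq_true, if_false]
      by_cases ht1 : 0 ≤ target.getD 1 0
      · rw [if_pos ht1]
        have hpos : pvPos (buttons.filter (fun b => decide (0 < b.getD 1 0))) := by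
          intro b hbp
          have := of_decide_eq_true (List.mem_filter.mp hbp).2
          omega
        have hinv0 : ∀ i : Nat, i < ([some 0] : List (Option Int)).length →
            pvMaxOf (([some 0] : List (Option Int)).getD i none)
              (pvReach (buttons.filter (fun b => decide (0 < b.getD 1 0))) (i : Int)) := by
          intro i hi
          simp only [List.length_cons, List.length_nil] at hi
          have : i = 0 := by omega
          subst this
          simp only [List.getD]
          refine ⟨(pvReach_zero hpos 0).mpr rfl, ?_⟩
          intro x hx
          have := (pvReach_zero hpos x).mp (by simpa using hx)
          omega
        rw [pvLoopB_iff (buttons.filter (fun b => decide (0 < b.getD 1 0))) (target.getD 0 0)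
          hpos _ [some 0] (by simp) hinv0]
        constructor
        · rintro ⟨j, hj1, hj2, f, hf, hreach⟩
          simp only [List.length_cons, List.length_nil] at hj1 hj2
          obtain ⟨l, hlsub, hls2, hls1⟩ := hreach
          have hlne : l ≠ [] := by
            rintro rfl
            simp [pvSum2] at hls2
            omega
          refine ⟨l, hlne, fun x hx => List.mem_of_mem_filter (hlsub x hx), ?_, by omega⟩
          rw [hls2]
          omega
        · intro hans
          rcases pvDecompose buttons (target.getD 0 0) (target.getD 1 0) hb hans with
            hc1 | hc2 | ⟨l, hlne, hlsub, hls2, hls1⟩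
          · exact absurd hc1 hany1
          · exact absurd hc2 hany2
          · have hpos1 : ∀ b ∈ l, (1:Int) ≤ b.getD 1 0 := by
              intro b hbl
              have := of_decide_eq_true (List.mem_filter.mp (hlsub b hbl)).2
              omega
            have hlen1 : 1 ≤ l.length := List.length_pos_iff.mpr hlne
            have hs2 : 1 ≤ pvSum2 l := by
              have := pvSum2_ge_len l hpos1
              omega
            refine ⟨(pvSum2 l).toNat, ?_, ?_, pvSum1 l, hls1, ?_⟩
            · simp only [List.length_cons, List.length_nil]
              omega
            · simp only [List.length_cons, List.length_nil]
              omega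
            · rw [Int.toNat_of_nonneg (by omega)]
              exact ⟨l, hlsub, rfl, rfl⟩
      · rw [if_neg ht1]
        constructor
        · intro h
          simp [pvLoopB] at h
        · intro hans
          exfalso
          obtain ⟨l, hlne, hlsub, hle, _⟩ := hans
          have := pvSum2_nonneg l (fun b hbl => (hb b (hlsub b hbl)).1)
          omega

-- ===== VERDICT (by name: the statement is the Claim_ definition above) =====
theorem coke_machine_spec : Claim_equal_coke_machine := by
  intro buttons target _ hpre
  unfold Spec_coke_machine
  rcases eq_or_ne buttons [] with rfl | hbne
  · rfl
  · have hb : ∀ b ∈ buttons, 0 ≤ b.getD 1 0 ∧ (b.getD 1 0 = 0 → 0 ≤ b.getD 0 0) :=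
      fun b hbm => ⟨(hpre.2 b hbm).2.1, (hpre.2 b hbm).2.2⟩
    rw [Bool.eq_iff_iff, coke_machine_iff buttons target hb,
      coke_machine_alt_iff buttons target hb hbne]
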